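-- pv_equiv track=rewrite | github.com/antonstakhouski/text-clasterization | main.py | count_terms
-- ===== SOURCE A (Python) =====
-- def slice_find(string, substring):
--     pos = string.find(substring)
--     if pos >= 0:
--         return string[:pos]
--     else:
--         return string
--
-- def count_terms(text, glossaries, vec):
--     term_sum = 0
--     for line in text:
--         word = line
--         word = slice_find(word, "|")
--         word = slice_find(word, "?")
--         for gloss in glossaries:
--             if word in gloss[0]:
--                 term_sum += 1
--                 gloss[0][word] += 1
--                 vec[gloss[1]] += 1
--     return term_sum
-- ===== SOURCE B (Python) =====
-- # B: builds an inverted index word -> glossary positions once, so each line is an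
-- # O(1) dict lookup instead of a scan over all glossaries. Same in-place mutations as A.
-- def count_terms(text, glossaries, vec):
--     index = {}
--     for i, gloss in enumerate(glossaries):
--         for w in gloss[0]:
--             index.setdefault(w, []).append(i)
--     term_sum = 0
--     for line in text:
--         word = line
--         for sep in ("|", "?"):
--             pos = word.find(sep)
--             if pos != -1:
--                 word = word[:pos]
--         for i in index.get(word, ()):
--             gloss = glossaries[i]
--             term_sum += 1
--             gloss[0][word] += 1
--             vec[gloss[1]] += 1
--     return term_sum
-- ===== Notes on version B (the rewrite author's own statement) =====
-- stated objective: faster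
-- what changed: B precomputes an inverted index word -> list of glossary positions once, so each text line is a single dict lookup instead of a scan over all glossaries (the per-line inner loop over glossaries disappears).
import Mathlib
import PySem

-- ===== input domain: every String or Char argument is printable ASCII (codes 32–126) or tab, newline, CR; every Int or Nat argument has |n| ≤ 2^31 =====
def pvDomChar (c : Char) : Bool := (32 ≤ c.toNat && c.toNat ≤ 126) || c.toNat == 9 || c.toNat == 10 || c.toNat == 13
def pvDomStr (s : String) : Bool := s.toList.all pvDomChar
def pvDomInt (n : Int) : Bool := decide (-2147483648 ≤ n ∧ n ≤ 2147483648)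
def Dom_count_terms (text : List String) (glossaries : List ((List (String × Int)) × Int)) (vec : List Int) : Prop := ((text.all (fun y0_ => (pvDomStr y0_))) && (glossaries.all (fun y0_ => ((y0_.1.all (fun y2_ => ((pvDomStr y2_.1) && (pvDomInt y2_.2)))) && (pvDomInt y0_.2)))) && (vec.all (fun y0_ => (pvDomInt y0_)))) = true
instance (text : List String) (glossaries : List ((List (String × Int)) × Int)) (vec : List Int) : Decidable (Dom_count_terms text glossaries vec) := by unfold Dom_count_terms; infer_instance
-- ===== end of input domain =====

-- B replaces the per-line scan over all glossaries by a precomputed inverted index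
-- (word -> list of glossary positions); equivalence is about the returned count
-- (B performs the same in-place mutations in Python; the ports thread that state).

-- ===== PORT A =====
-- slice_find(string, substring)
def pvSliceFind (s sub : String) : String :=
  let pos := PySem.Str.find s sub
  if 0 ≤ pos then PySem.Str.slice s none (some pos) else s

-- gloss[0][word] += 1 on the association-list dict (first matching key is bumped)
def pvBump (w : String) : List (String × Int) → List (String × Int)
  | [] => []
  | p :: rest => if p.1 == w then (p.1, p.2 + 1) :: rest else p :: pvBump w rest

-- inner 'for gloss in glossaries' loop of A: threads (glossaries, vec, term_sum)
def pvLoopGlossA (word : String) :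
    List ((List (String × Int)) × Int) → List Int → Int →
    (List ((List (String × Int)) × Int) × List Int × Int)
  | [], vec, s => ([], vec, s)
  | g :: rest, vec, s =>
    if g.1.any (fun p => p.1 == word) then
      let vec' := PySem.List.pySetD vec g.2 (PySem.List.pyGetD vec g.2 0 + 1)
      let out := pvLoopGlossA word rest vec' (s + 1)
      ((pvBump word g.1, g.2) :: out.1, out.2)
    else
      let out := pvLoopGlossA word rest vec s
      (g :: out.1, out.2)

-- outer 'for line in text' loop of A
def pvLoopTextA : List String → List ((List (String × Int)) × Int) → List Int → Int → Int
  | [], _, _, s => s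
  | line :: rest, gs, vec, s =>
    let word := pvSliceFind (pvSliceFind line "|") "?"
    let out := pvLoopGlossA word gs vec s
    pvLoopTextA rest out.1 out.2.1 out.2.2

def count_terms (text : List String) (glossaries : List ((List (String × Int)) × Int)) (vec : List Int) : Int :=
  pvLoopTextA text glossaries vec 0

-- ===== PORT B =====
-- word extraction: 'for sep in ("|","?"): pos = word.find(sep); if pos != -1: word = word[:pos]'
def pvWordB (line : String) : String :=
  ["|", "?"].foldl (fun w sep =>
    let pos := PySem.Str.find w sep
    if pos ≠ -1 then PySem.Str.slice w none (some pos) else w) line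

-- 'index.setdefault(w, []).append(i)' over enumerate(glossaries); iterating a dict's
-- keys visits each distinct key once, hence PySem.List.dedup over the key column
def pvIndex (glossaries : List ((List (String × Int)) × Int)) : PySem.Dict String (List Int) :=
  (PySem.List.enumerate glossaries 0).foldl (fun d ig =>
    (PySem.List.dedup (ig.2.1.map Prod.fst)).foldl
      (fun d w => d.modify w [] (· ++ [ig.1])) d)
    PySem.Dict.empty

-- inner 'for i in index.get(word, ())' loop of B: threads (glossaries, vec, term_sum)
def pvLoopHits (word : String) :
    List Int → List ((List (String × Int)) × Int) → List Int → Int →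
    (List ((List (String × Int)) × Int) × List Int × Int)
  | [], gs, vec, s => (gs, vec, s)
  | i :: rest, gs, vec, s =>
    let g := PySem.List.pyGetD gs i ([], 0)
    let gs' := PySem.List.pySetD gs i (pvBump word g.1, g.2)
    let vec' := PySem.List.pySetD vec g.2 (PySem.List.pyGetD vec g.2 0 + 1)
    pvLoopHits word rest gs' vec' (s + 1)

-- outer 'for line in text' loop of B
def pvLoopTextB (index : PySem.Dict String (List Int)) :
    List String → List ((List (String × Int)) × Int) → List Int → Int → Int
  | [], _, _, s => s
  | line :: rest, gs, vec, s =>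
    let word := pvWordB line
    let out := pvLoopHits word (index.getD word []) gs vec s
    pvLoopTextB index rest out.1 out.2.1 out.2.2

def count_terms_alt (text : List String) (glossaries : List ((List (String × Int)) × Int)) (vec : List Int) : Int :=
  pvLoopTextB (pvIndex glossaries) text glossaries vec 0

-- ===== PRECONDITION & SPEC =====
-- the word some line reduces to, as the Python computes it
def pvWordOf (line : String) : String := pvSliceFind (pvSliceFind line "|") "?"

-- Pre_ excludes exactly the inputs on which Python A raises IndexError: some line's
-- word matches a glossary whose vec-index gloss[1] is out of range for 'vec[gloss[1]] += 1'.
def Pre_count_terms (text : List String) (glossaries : List ((List (String × Int)) × Int)) (vec : List Int) : Prop :=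
  ∀ g ∈ glossaries,
    (∃ line ∈ text, g.1.any (fun p => p.1 == pvWordOf line) = true) →
    PySem.Raise.InRange vec.length g.2
instance (text : List String) (glossaries : List ((List (String × Int)) × Int)) (vec : List Int) : Decidable (Pre_count_terms text glossaries vec) := by unfold Pre_count_terms; infer_instance

def pvWitness_count_terms : List String × (List ((List (String × Int)) × Int)) × List Int :=
  (["apple|x", "pear?y"], [([("apple", 0), ("plum", 1)], 0), ([("pear", 2)], 1)], [0, 0])

def Spec_count_terms (text : List String) (glossaries : List ((List (String × Int)) × Int)) (vec : List Int) (out : Int) : Prop := out = count_terms_alt text glossaries vec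
instance (text : List String) (glossaries : List ((List (String × Int)) × Int)) (vec : List Int) (out : Int) : Decidable (Spec_count_terms text glossaries vec out) := by unfold Spec_count_terms; infer_instance

-- ===== CLAIM (what is proved, stated in full; the proofs are below) =====
def Claim_equal_count_terms : Prop := ∀ (text : List String) (glossaries : List ((List (String × Int)) × Int)) (vec : List Int), Dom_count_terms text glossaries vec → Pre_count_terms text glossaries vec → Spec_count_terms text glossaries vec (count_terms text glossaries vec)

-- ===== LEMMAS AND PROOFS =====

-- key column of a glossary entry (all either loop ever reads from the threaded state)
def pvShape (g : (List (String × Int)) × Int) : List String := g.1.map Prod.fst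

-- number of shapes containing the word
def pvCnt (w : String) (shapes : List (List String)) : Int :=
  (shapes.countP (fun ks => ks.any (· == w)) : Int)

-- common closed form both ports are reduced to
def pvTotal : List String → List (List String) → Int
  | [], _ => 0
  | line :: rest, shapes => pvCnt (pvWordOf line) shapes + pvTotal rest shapes

theorem pvBump_fst (w : String) (l : List (String × Int)) :
    (pvBump w l).map Prod.fst = l.map Prod.fst := by
  induction l with
  | nil => rfl
  | cons p rest ih => by_cases h : p.1 == w <;> simp [pvBump, h, ih]

theorem pvLoopGlossA_sum (word : String) (gs : List ((List (String × Int)) × Int))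
    (vec : List Int) (s : Int) :
    (pvLoopGlossA word gs vec s).2.2 = s + pvCnt word (gs.map pvShape) := by
  induction gs generalizing vec s with
  | nil => simp [pvLoopGlossA, pvCnt]
  | cons g rest ih =>
    by_cases h : g.1.any (fun p => p.1 == word) = true
    · have hk : (pvShape g).any (· == word) = true := by
        simpa [pvShape, List.any_map, Function.comp] using h
      simp [pvLoopGlossA, h, ih, pvCnt, hk]
      ring
    · have hk : ¬ (pvShape g).any (· == word) = true := by
        simpa [pvShape, List.any_map, Function.comp] using h
      simp [pvLoopGlossA, h, ih, pvCnt, hk]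

theorem pvLoopGlossA_shape (word : String) (gs : List ((List (String × Int)) × Int))
    (vec : List Int) (s : Int) :
    (pvLoopGlossA word gs vec s).1.map pvShape = gs.map pvShape := by
  induction gs generalizing vec s with
  | nil => rfl
  | cons g rest ih =>
    by_cases h : g.1.any (fun p => p.1 == word) = true <;>
      simp [pvLoopGlossA, h, ih, pvShape, pvBump_fst]

theorem pvLoopTextA_total (text : List String) (gs : List ((List (String × Int)) × Int))
    (vec : List Int) (s : Int) :
    pvLoopTextA text gs vec s = s + pvTotal text (gs.map pvShape) := by
  induction text generalizing gs vec s with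
  | nil => simp [pvLoopTextA, pvTotal]
  | cons line rest ih =>
    simp only [pvLoopTextA, pvTotal]
    rw [ih, pvLoopGlossA_shape, pvLoopGlossA_sum]
    have : pvSliceFind (pvSliceFind line "|") "?" = pvWordOf line := rfl
    rw [this]; ring

theorem pvLoopHits_sum (word : String) (l : List Int)
    (gs : List ((List (String × Int)) × Int)) (vec : List Int) (s : Int) :
    (pvLoopHits word l gs vec s).2.2 = s + (l.length : Int) := by
  induction l generalizing gs vec s with
  | nil => simp [pvLoopHits]
  | cons i rest ih => simp [pvLoopHits, ih]; ring

theorem pvLoopTextB_total (index : PySem.Dict String (List Int)) (text : List String)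
    (gs : List ((List (String × Int)) × Int)) (vec : List Int) (s : Int) :
    pvLoopTextB index text gs vec s =
      s + ((text.map (fun line => ((index.getD (pvWordB line) []).length : Int))).sum) := by
  induction text generalizing gs vec s with
  | nil => simp [pvLoopTextB]
  | cons line rest ih =>
    simp only [pvLoopTextB, List.map_cons, List.sum_cons]
    rw [ih, pvLoopHits_sum]; ring


theorem pvStep_eq (w sep : String) :
    (if PySem.Str.find w sep ≠ -1 then PySem.Str.slice w none (some (PySem.Str.find w sep)) else w)
      = pvSliceFind w sep := by
  have h : (PySem.Str.find w sep ≠ -1) ↔ (0 ≤ PySem.Str.find w sep) := by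
    rw [PySem.Str.find_ne_neg_one_iff, PySem.Str.find_nonneg_iff]
  simp only [pvSliceFind]
  by_cases hc : 0 ≤ PySem.Str.find w sep
  · rw [if_pos (h.mpr hc), if_pos hc]
  · rw [if_neg (fun hn => hc (h.mp hn)), if_neg hc]

theorem pvWordB_eq (line : String) : pvWordB line = pvWordOf line := by
  simp only [pvWordB, pvWordOf, List.foldl]
  rw [pvStep_eq, pvStep_eq]

theorem pv_sum_ite_eq_countP {α : Type} (l : List α) (p : α → Bool) :
    (l.map (fun x => if p x then 1 else 0)).sum = l.countP p := by
  induction l with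
  | nil => rfl
  | cons x rest ih =>
    by_cases h : p x <;> simp [h, ih] <;> omega

theorem pvIndex_eq_foldl_pairs (glossaries : List ((List (String × Int)) × Int)) :
    pvIndex glossaries =
      ((PySem.List.enumerate glossaries 0).flatMap
          (fun ig => (PySem.List.dedup (ig.2.1.map Prod.fst)).map (fun w => (w, ig.1)))).foldl
        (fun d p => d.modify p.1 [] (· ++ [p.2])) PySem.Dict.empty := by
  rw [List.foldl_flatMap]
  simp only [pvIndex, List.foldl_map]

theorem pv_inner_len (ks : List String) (w : String) :
    ((PySem.List.dedup ks).filter (· == w)).length = if ks.any (· == w) then 1 else 0 := by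
  have hlen : ((PySem.List.dedup ks).filter (· == w)).length = (PySem.List.dedup ks).count w := by
    simp [List.count, List.countP_eq_length_filter]
  by_cases h : w ∈ ks
  · have ha : ks.any (· == w) = true := by
      simp only [List.any_eq_true, beq_iff_eq]; exact ⟨w, h, rfl⟩
    rw [if_pos ha, hlen]
    exact List.count_eq_one_of_mem (PySem.List.nodup_dedup ks) ((PySem.List.mem_dedup ks w).mpr h)
  · have ha : ¬ ks.any (· == w) = true := by
      simp only [List.any_eq_true, beq_iff_eq, not_exists]
      rintro x ⟨hx, rfl⟩; exact h hx
    rw [if_neg ha, hlen]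
    exact List.count_eq_zero.mpr (fun hm => h ((PySem.List.mem_dedup ks w).mp hm))

theorem pvIndex_getD_len (glossaries : List ((List (String × Int)) × Int)) (w : String) :
    ((pvIndex glossaries).getD w []).length
      = (glossaries.map pvShape).countP (fun ks => ks.any (· == w)) := by
  rw [pvIndex_eq_foldl_pairs, PySem.Dict.getD_foldl_modify_append]
  simp only [PySem.Dict.getD_empty, List.nil_append, List.length_map]
  rw [List.filter_flatMap, List.length_flatMap]
  have h1 : (fun ig : Int × ((List (String × Int)) × Int) =>
        (((PySem.List.dedup (ig.2.1.map Prod.fst)).map (fun w' => (w', ig.1))).filter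
            (fun p => p.1 == w)).length)
      = (fun ig => if (pvShape ig.2).any (· == w) then 1 else 0) := by
    funext ig
    rw [List.filter_map, List.length_map]
    simpa [Function.comp, pvShape] using pv_inner_len (ig.2.1.map Prod.fst) w
  rw [h1]
  have h2 : List.map (fun ig : Int × ((List (String × Int)) × Int) =>
        if (pvShape ig.2).any (· == w) then 1 else 0) (PySem.List.enumerate glossaries 0)
      = List.map (fun g => if (pvShape g).any (· == w) then 1 else 0) glossaries := by
    conv_rhs => rw [← PySem.List.map_snd_enumerate (xs := glossaries) (s := 0)]
    rw [List.map_map]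
    rfl
  rw [h2]
  rw [pv_sum_ite_eq_countP, List.countP_map]
  rfl

theorem pvIndex_getD (glossaries : List ((List (String × Int)) × Int)) (w : String) :
    (((pvIndex glossaries).getD w []).length : Int) = pvCnt w (glossaries.map pvShape) := by
  rw [pvIndex_getD_len]; rfl

theorem pvTotal_eq_sum (glossaries : List ((List (String × Int)) × Int)) (text : List String) :
    pvTotal text (glossaries.map pvShape)
      = (text.map (fun line => (((pvIndex glossaries).getD (pvWordB line) []).length : Int))).sum := by
  induction text with
  | nil => rfl
  | cons line rest ih =>
    simp only [pvTotal, List.map_cons, List.sum_cons, ih, pvWordB_eq, pvIndex_getD]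

-- ===== VERDICT (by name: the statement is the Claim_ definition above) =====
theorem count_terms_spec : Claim_equal_count_terms := by
  intro text glossaries vec _ _
  unfold Spec_count_terms count_terms count_terms_alt
  rw [pvLoopTextA_total, pvLoopTextB_total, pvTotal_eq_sum]
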